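-- pv_equiv track=rewrite | github.com/kimkyeonghun/stock_summary_service | stock_mvp/scheduler.py | parse_month_schedule
-- ===== SOURCE A (Python) =====
-- def parse_month_schedule(value: str) -> list[int]:
--     parts = [p.strip() for p in (value or "").split(",") if p.strip()]
--     months: list[int] = []
--     seen: set[int] = set()
--     for part in parts:
--         if not part.isdigit():
--             continue
--         num = int(part)
--         if num < 1 or num > 12:
--             continue
--         if num in seen:
--             continue
--         seen.add(num)
--         months.append(num)
--     return sorted(months)
-- ===== SOURCE B (Python) =====
-- def parse_month_schedule(value: str) -> list[int]:
--     present = [False] * 13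
--     for piece in (value or "").split(","):
--         piece = piece.strip()
--         if piece.isdigit():
--             num = int(piece)
--             if 1 <= num <= 12:
--                 present[num] = True
--     return [num for num in range(1, 13) if present[num]]
-- ===== Notes on version B (the rewrite author's own statement) =====
-- stated objective: alternative
-- what changed: B drops A's seen-set/append/final-sort pipeline: it marks valid months in a fixed 13-slot boolean presence array and emits the result by scanning the value domain 1..12 in order, so deduplication and sorting both disappear.
import Mathlib
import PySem

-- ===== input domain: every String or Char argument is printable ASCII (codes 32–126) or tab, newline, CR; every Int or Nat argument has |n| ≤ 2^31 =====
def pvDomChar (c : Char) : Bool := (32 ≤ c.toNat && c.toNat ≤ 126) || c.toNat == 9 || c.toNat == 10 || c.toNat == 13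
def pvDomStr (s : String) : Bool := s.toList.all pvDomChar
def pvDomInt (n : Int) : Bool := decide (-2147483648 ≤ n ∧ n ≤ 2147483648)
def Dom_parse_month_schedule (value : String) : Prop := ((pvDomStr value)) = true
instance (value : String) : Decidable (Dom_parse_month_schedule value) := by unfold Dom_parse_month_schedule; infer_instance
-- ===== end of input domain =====

-- B replaces A's seen-set + append + final sort by a 13-slot presence array scanned in
-- domain order 1..12, so no sort call remains (objective: alternative/idiomatic).

-- ===== PORT A =====
-- loop body of A; st = (months, seen)
def pvStepA (st : List Int × PySem.Set Int) (part : String) : List Int × PySem.Set Int :=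
  if ¬ (PySem.Str.strIsdigit part = true) then st
  else
    -- part.isdigit() = True guarantees int(part) returns, so the getD default is never used
    let num : Int := (PySem.Int.ofStr? part).getD 0
    if num < 1 ∨ num > 12 then st
    else if PySem.Set.contains st.2 num then st
    else (st.1 ++ [num], PySem.Set.add st.2 num)

def parse_month_schedule (value : String) : List Int :=
  -- '(value or "")' equals value for strings ("" or "" = ""); split sep "," ≠ "" never raises
  let parts : List String :=
    ((PySem.Str.split? value ",").getD []).filterMap
      (fun p => if PySem.Str.strip p ≠ "" then some (PySem.Str.strip p) else none)
  let res := parts.foldl pvStepA ([], PySem.Set.empty)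
  PySem.List.sorted res.1 (fun x => x) false

-- ===== PORT B =====
-- loop body of B: mark valid months in the presence array
def pvStepB (pr : List Bool) (piece : String) : List Bool :=
  let p := PySem.Str.strip piece
  if PySem.Str.strIsdigit p then
    -- p.isdigit() = True guarantees int(p) returns, so the getD default is never used
    let num : Int := (PySem.Int.ofStr? p).getD 0
    if 1 ≤ num ∧ num ≤ 12 then PySem.List.pySetD pr num true else pr
  else pr

def parse_month_schedule_alt (value : String) : List Int :=
  let present := ((PySem.Str.split? value ",").getD []).foldl pvStepB (List.replicate 13 false)
  (PySem.List.pyRange 1 13 1).filter (fun num => PySem.List.pyGetD present num false)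

-- ===== PRECONDITION & SPEC =====
def Spec_parse_month_schedule (value : String) (out : List Int) : Prop := out = parse_month_schedule_alt value
instance (value : String) (out : List Int) : Decidable (Spec_parse_month_schedule value out) := by unfold Spec_parse_month_schedule; infer_instance

-- ===== CLAIM (what is proved, stated in full; the proofs are below) =====
def Claim_equal_parse_month_schedule : Prop := ∀ (value : String), Dom_parse_month_schedule value → Spec_parse_month_schedule value (parse_month_schedule value)

-- ===== LEMMAS AND PROOFS =====

-- the month number a (stripped) piece contributes, if any
def pvHit (q : String) : Option Int :=
  if PySem.Str.strIsdigit q = true ∧ 1 ≤ ((PySem.Int.ofStr? q).getD 0) ∧ ((PySem.Int.ofStr? q).getD 0) ≤ 12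
  then some ((PySem.Int.ofStr? q).getD 0) else none

def pvNums (l : List String) : List Int := l.filterMap pvHit

-- A's months after folding the remaining pieces, starting from months = seen = m
def pvG (m : List Int) (l : List String) : List Int := (l.foldl pvStepA (m, m)).1

lemma pvHit_some {q : String} {num : Int} (hq : pvHit q = some num) :
    1 ≤ num ∧ num ≤ 12 := by
  unfold pvHit at hq
  split at hq
  next h => injection hq with h'; exact h' ▸ ⟨h.2.1, h.2.2⟩
  next => cases hq

lemma pvStepA_pair (m : List Int) (q : String) :
    pvStepA (m, m) q =
      (match pvHit q with
       | some num => if num ∈ m then (m, m) else (m ++ [num], m ++ [num])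
       | none => (m, m)) := by
  unfold pvStepA pvHit PySem.Set.add
  have hc := PySem.Set.contains_iff (α := Int) m ((PySem.Int.ofStr? q).getD 0)
  split_ifs <;> simp_all

lemma pvG_nil (m : List Int) : pvG m [] = m := rfl

lemma pvG_cons (m : List Int) (q : String) (t : List String) :
    pvG m (q :: t) =
      (match pvHit q with
       | some num => if num ∈ m then pvG m t else pvG (m ++ [num]) t
       | none => pvG m t) := by
  unfold pvG
  rw [List.foldl_cons, pvStepA_pair]
  cases pvHit q with
  | none => rfl
  | some num => by_cases h : num ∈ m <;> simp [h]

lemma pvG_mem (l : List String) : ∀ (m : List Int) (x : Int),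
    x ∈ pvG m l ↔ x ∈ m ∨ x ∈ pvNums l := by
  induction l with
  | nil => intro m x; simp [pvG_nil, pvNums]
  | cons q t ih =>
    intro m x
    rw [pvG_cons]
    cases hq : pvHit q with
    | none => simp [pvNums, hq, ih m x]
    | some num =>
      by_cases h : num ∈ m
      · simp only [h, if_true]
        rw [ih m x]
        simp [pvNums, hq]
        constructor
        · tauto
        · rintro (hx | rfl | hx)
          · tauto
          · exact Or.inl h
          · tauto
      · simp only [h, if_false]
        rw [ih (m ++ [num]) x]
        simp [pvNums, hq, or_assoc]

lemma pvG_nodup_bounds (l : List String) : ∀ (m : List Int), m.Nodup →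
    (∀ x ∈ m, 1 ≤ x ∧ x ≤ 12) →
    (pvG m l).Nodup ∧ ∀ x ∈ pvG m l, 1 ≤ x ∧ x ≤ 12 := by
  induction l with
  | nil => intro m h1 h2; simpa [pvG_nil] using ⟨h1, h2⟩
  | cons q t ih =>
    intro m h1 h2
    rw [pvG_cons]
    cases hq : pvHit q with
    | none => exact ih m h1 h2
    | some num =>
      have hrng : 1 ≤ num ∧ num ≤ 12 := pvHit_some hq
      by_cases h : num ∈ m
      · simp only [h, if_true]; exact ih m h1 h2
      · simp only [h, if_false]
        refine ih (m ++ [num]) ?_ ?_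
        · rw [List.nodup_append]
          refine ⟨h1, List.nodup_singleton num, ?_⟩
          intro a ha b hb
          rw [List.mem_singleton] at hb
          subst hb
          exact fun hc => h (hc ▸ ha)
        · intro x hx
          rcases List.mem_append.mp hx with hx | hx
          · exact h2 x hx
          · simp at hx; subst hx; exact hrng

-- dropping the empty pieces does not change the extracted months
lemma pvNums_filterMap (l : List String) :
    pvNums (l.filterMap (fun p => if PySem.Str.strip p ≠ "" then some (PySem.Str.strip p) else none))
      = pvNums (l.map PySem.Str.strip) := by
  induction l with
  | nil => rfl
  | cons p t ih =>
    by_cases h : PySem.Str.strip p = ""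
    · have hnone : pvHit "" = none := by decide
      simp [List.map_cons, h, pvNums, hnone] at ih ⊢
      exact ih
    · simp [List.filterMap_cons, List.map_cons, h, pvNums] at ih ⊢
      rw [ih]

lemma pvStepB_eq (pr : List Bool) (q : String) :
    pvStepB pr q =
      (match pvHit (PySem.Str.strip q) with
       | some num => PySem.List.pySetD pr num true
       | none => pr) := by
  unfold pvStepB pvHit
  split_ifs <;> simp_all

lemma pvFoldB_length (l : List String) : ∀ pr : List Bool,
    (l.foldl pvStepB pr).length = pr.length := by
  induction l with
  | nil => intro pr; rfl
  | cons q t ih =>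
    intro pr
    rw [List.foldl_cons, ih, pvStepB_eq]
    cases hq : pvHit (PySem.Str.strip q) with
    | none => rfl
    | some num => exact PySem.List.length_pySetD pr num true

set_option maxHeartbeats 1000000 in
lemma pvFoldB_get (l : List String) : ∀ (pr : List Bool), pr.length = 13 →
    ∀ n : Nat, n < 13 →
    (l.foldl pvStepB pr)[n]?.getD false
      = (pr[n]?.getD false || decide ((n : Int) ∈ pvNums (l.map PySem.Str.strip))) := by
  induction l with
  | nil => intro pr hpr n hn; simp [pvNums]
  | cons q t ih =>
    intro pr hpr n hn
    rw [List.foldl_cons, pvStepB_eq]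
    cases hq : pvHit (PySem.Str.strip q) with
    | none =>
      rw [ih pr hpr n hn]
      simp [pvNums, hq]
    | some num =>
      have hrng : 1 ≤ num ∧ num ≤ 12 := pvHit_some hq
      have hset : PySem.List.pySetD pr num true = pr.set num.toNat true :=
        PySem.List.pySetD_of_nonneg pr true (by omega)
      have hlen : (pr.set num.toNat true).length = 13 := by simp [hpr]
      show (t.foldl pvStepB (PySem.List.pySetD pr num true))[n]?.getD false
          = (pr[n]?.getD false || decide ((n : Int) ∈ pvNums ((q :: t).map PySem.Str.strip)))
      rw [hset, ih _ hlen n hn]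
      have hmemcons : ((n : Int) ∈ pvNums ((q :: t).map PySem.Str.strip))
          ↔ ((n : Int) = num ∨ (n : Int) ∈ pvNums (t.map PySem.Str.strip)) := by
        simp [pvNums, hq]
      by_cases heq : n = num.toNat
      · subst heq
        have h1 : (pr.set num.toNat true)[num.toNat]? = some true :=
          List.getElem?_set_self (by omega)
        have h2 : ((num.toNat : Nat) : Int) = num := by omega
        have hd : num ∈ pvNums ((q :: t).map PySem.Str.strip) := by
          simp [pvNums, hq]
        rw [h1]
        simp only [Option.getD_some, Bool.true_or]
        rw [eq_comm, Bool.or_eq_true]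
        right
        rw [decide_eq_true_iff, h2]
        exact hd
      · have h1 : (pr.set num.toNat true)[n]? = pr[n]? := List.getElem?_set_ne (by omega)
        have h2 : ¬ ((n : Int) = num) := by omega
        rw [h1]
        simp only [hmemcons, h2, false_or]

theorem parse_month_schedule_spec : Claim_equal_parse_month_schedule := by
  intro value _
  unfold Spec_parse_month_schedule parse_month_schedule parse_month_schedule_alt
  set pieces := (PySem.Str.split? value ",").getD [] with hpieces
  set parts := pieces.filterMap
      (fun p => if PySem.Str.strip p ≠ "" then some (PySem.Str.strip p) else none) with hparts
  set m := pvG [] parts with hm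
  have hmem : ∀ x : Int, x ∈ m ↔ x ∈ pvNums (pieces.map PySem.Str.strip) := by
    intro x
    rw [hm, pvG_mem, hparts, pvNums_filterMap]
    simp
  obtain ⟨hnd, hbd⟩ := pvG_nodup_bounds parts [] (by simp) (by simp)
  set present := pieces.foldl pvStepB (List.replicate 13 false) with hpresent
  have hplen : present.length = 13 := by
    rw [hpresent, pvFoldB_length]; simp
  -- B's result is the 1..12 scan filtered by membership in A's months
  have hfilter : (PySem.List.pyRange 1 13 1).filter (fun num => PySem.List.pyGetD present num false)
      = (PySem.List.pyRange 1 13 1).filter (fun num => decide (num ∈ m)) := by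
    apply List.filter_congr
    intro num hnum
    have hb : 1 ≤ num ∧ num < 13 := PySem.List.mem_pyRange_one.mp hnum
    have h1 : PySem.List.pyGetD present num false = present[num.toNat]?.getD false := by
      rw [PySem.List.pyGetD_eq_getElem present false (by omega)
        (by rw [hplen]; omega)]
      rw [List.getElem?_eq_getElem (by omega)]
      rfl
    have h2 : ((num.toNat : Nat) : Int) = num := by omega
    rw [h1, pvFoldB_get pieces (List.replicate 13 false) (by simp) num.toNat (by omega)]
    have hrep : (List.replicate 13 false)[num.toNat]?.getD false = false := by
      rw [List.getElem?_replicate_of_lt (by omega)]; rfl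
    rw [hrep, Bool.false_or, h2]
    simp [hmem num]
  rw [hfilter]
  -- A's sort of the distinct months equals the ascending domain scan
  apply PySem.List.sorted_eq_of_perm_of_pairwise_lt
  · rw [List.perm_ext_iff_of_nodup]
    · intro a
      simp only [List.mem_filter, decide_eq_true_eq]
      constructor
      · exact fun h => h.2
      · intro h
        refine ⟨?_, h⟩
        have := hbd a h
        exact PySem.List.mem_pyRange_one.mpr ⟨this.1, by omega⟩
    · exact List.Nodup.filter _ (by decide)
    · exact hnd
  · exact List.Pairwise.filter _ (by decide)
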